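-- pv_equiv track=rewrite | github.com/lilong-wen/paper_seg | handcraft/num_detection.py | remove_far_locs
-- ===== SOURCE A (Python) =====
-- import itertools
--
-- def remove_far_locs(locs_list):
--     for a, b in itertools.combinations(locs_list, 2):
--         if a == b:
--             continue
--         elif abs(a[0] - b[0]) > 100:
--             if a in locs_list:
--                 locs_list.remove(a)
--             else:
--                 continue
--     return locs_list
-- ===== SOURCE B (Python) =====
-- def remove_far_locs(locs_list):
--     # One backward pass: keep a point iff its x is within 100 of every later
--     # point, tracked with a running min/max of x over the suffix.
--     kept = []
--     mn = mx = None
--     for p in reversed(locs_list):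
--         if mn is None or (p[0] - mn <= 100 and mx - p[0] <= 100):
--             kept.append(p)
--         if mn is None:
--             mn = mx = p[0]
--         else:
--             mn = min(mn, p[0])
--             mx = max(mx, p[0])
--     kept.reverse()
--     return kept
-- ===== Notes on version B (the rewrite author's own statement) =====
-- stated objective: faster
-- what changed: A scans all pairs of a snapshot while mutating the list with O(n) membership tests and remove calls; B makes one backward pass keeping a point iff it is within 100 in x of every later point, using a running suffix min/max.
-- intended difference: On lists where some duplicated point value has an occurrence far (more than 100 in x) from two or more later points while its last occurrence is within 100 of all later points, A's remove-while-iterating deletes one leading occurrence per far pair and so returns a list with too few copies of that value; B keeps exactly the occurrences that are within 100 of every later point, which is the intended filter. — e.g. on remove_far_locs([(0,0),(200,0),(200,0),(0,0)]): A returns [], B returns [(0,0)]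
import Mathlib
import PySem

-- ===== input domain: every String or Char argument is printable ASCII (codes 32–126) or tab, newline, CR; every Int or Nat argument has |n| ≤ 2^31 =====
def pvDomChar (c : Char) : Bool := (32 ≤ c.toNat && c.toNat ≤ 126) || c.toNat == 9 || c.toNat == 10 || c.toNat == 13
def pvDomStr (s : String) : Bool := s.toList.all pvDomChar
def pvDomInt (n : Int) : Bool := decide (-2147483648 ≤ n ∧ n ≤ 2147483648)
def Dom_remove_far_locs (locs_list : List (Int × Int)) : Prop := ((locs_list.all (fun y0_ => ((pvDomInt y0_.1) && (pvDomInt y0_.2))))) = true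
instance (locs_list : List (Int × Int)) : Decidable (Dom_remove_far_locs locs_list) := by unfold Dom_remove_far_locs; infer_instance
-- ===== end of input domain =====

-- B replaces A's mutate-while-iterating pair scan (membership test + remove per far
-- pair) by one backward pass with a suffix min/max of x, keeping a point iff it is
-- within 100 of every later point. A mutates locs_list in place and returns it, B
-- builds a fresh list — the equivalence proved here is about the RETURN value only.

-- ===== PORT A =====
-- itertools.combinations(locs_list, 2): pairs (i, j), i < j, of the list as it is at call time
def pvCombs : List (Int × Int) → List ((Int × Int) × (Int × Int))
  | [] => []
  | x :: xs => xs.map (fun y => (x, y)) ++ pvCombs xs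

def remove_far_locs (locs_list : List (Int × Int)) : List (Int × Int) :=
  (pvCombs locs_list).foldl
    (fun st ab =>
      if ab.1 = ab.2 then st
      else if (100 : Int) < |ab.1.1 - ab.2.1| then
        -- 'if a in locs_list: locs_list.remove(a)' — remove = erase first occurrence
        (if ab.1 ∈ st then st.erase ab.1 else st)
      else st)
    locs_list

-- ===== PORT B =====
-- loop body of Source B: state (kept, mn, mx); mn/mx are None before the first element
def pvBStep (st : List (Int × Int) × Option Int × Option Int) (p : Int × Int) :
    List (Int × Int) × Option Int × Option Int :=
  let kept :=
    match st.2.1, st.2.2 with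
    | some m, some M => if p.1 - m ≤ 100 ∧ M - p.1 ≤ 100 then st.1 ++ [p] else st.1
    | _, _ => st.1 ++ [p]
  (kept,
   some (match st.2.1 with | none => p.1 | some m => min m p.1),
   some (match st.2.2 with | none => p.1 | some M => max M p.1))

def remove_far_locs_alt (locs_list : List (Int × Int)) : List (Int × Int) :=
  ((locs_list.reverse.foldl pvBStep ([], none, none)).1).reverse

-- ===== PRECONDITION & SPEC =====

-- helpers for D_ (conditions on the INPUT only):
-- number of far pairs (i < j, |x_i - x_j| > 100) whose first component is the value v
def pvHeadFar : List (Int × Int) → (Int × Int) → Nat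
  | [], _ => 0
  | a :: xs, v =>
      (if a = v then xs.countP (fun b => decide ((100 : Int) < |v.1 - b.1|)) else 0) + pvHeadFar xs v

-- number of occurrences of v that have at least one later far point
def pvBadOcc : List (Int × Int) → (Int × Int) → Nat
  | [], _ => 0
  | a :: xs, v =>
      (if a = v ∧ xs.any (fun b => decide ((100 : Int) < |v.1 - b.1|)) then 1 else 0) + pvBadOcc xs v

-- On lists where some duplicated point value has an occurrence far (>100 in x) from two or
-- more later points while its last occurrence is within 100 of all later points, A's
-- remove-while-iterating deletes one leading occurrence per far pair and so drops too many
-- copies; B keeps exactly the occurrences within 100 of every later point — the intended filter.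
def D_remove_far_locs (locs_list : List (Int × Int)) : Prop :=
  ∃ v ∈ locs_list,
    pvBadOcc locs_list v < locs_list.count v ∧ pvBadOcc locs_list v < pvHeadFar locs_list v
instance (locs_list : List (Int × Int)) : Decidable (D_remove_far_locs locs_list) := by
  unfold D_remove_far_locs; infer_instance

def Spec_remove_far_locs (locs_list : List (Int × Int)) (out : List (Int × Int)) : Prop :=
  ¬ D_remove_far_locs locs_list → out = remove_far_locs_alt locs_list
instance (locs_list : List (Int × Int)) (out : List (Int × Int)) : Decidable (Spec_remove_far_locs locs_list out) := by unfold Spec_remove_far_locs; infer_instance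

def pvDiffWitness_remove_far_locs : (List (Int × Int)) := [(0,0),(200,0),(200,0),(0,0)]
def pvDiffWitnessOut_remove_far_locs : (List (Int × Int)) × (List (Int × Int)) := ([], [(0,0)])

-- ===== CLAIM (what is proved, stated in full; the proofs are below) =====
def Claim_unchanged_remove_far_locs : Prop := ∀ (locs_list : List (Int × Int)), Dom_remove_far_locs locs_list → Spec_remove_far_locs locs_list (remove_far_locs locs_list)
def Claim_changed_remove_far_locs : Prop := Dom_remove_far_locs (pvDiffWitness_remove_far_locs) ∧ D_remove_far_locs (pvDiffWitness_remove_far_locs) ∧ remove_far_locs (pvDiffWitness_remove_far_locs) = pvDiffWitnessOut_remove_far_locs.1 ∧ remove_far_locs_alt (pvDiffWitness_remove_far_locs) = pvDiffWitnessOut_remove_far_locs.2 ∧ pvDiffWitnessOut_remove_far_locs.1 ≠ pvDiffWitnessOut_remove_far_locs.2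
def Claim_exact_remove_far_locs : Prop := ∀ (locs_list : List (Int × Int)), Dom_remove_far_locs locs_list → D_remove_far_locs locs_list → remove_far_locs locs_list ≠ remove_far_locs_alt locs_list

-- ===== LEMMAS AND PROOFS =====

-- Bool test for "far pair"
def pvFar (a b : Int × Int) : Bool := decide ((100 : Int) < |a.1 - b.1|)

-- abstract form of both programs: keep each element iff its value's pending drop count is ≤ 0,
-- decrementing the count of the value just passed
def pvKeep : List (Int × Int) → ((Int × Int) → Int) → List (Int × Int)
  | [], _ => []
  | a :: xs, cnt =>
      let r := pvKeep xs (fun v => if v = a then cnt v - 1 else cnt v)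
      if cnt a ≤ 0 then a :: r else r

-- number of far pairs in ps headed by value v
def pvSpecCnt (ps : List ((Int × Int) × (Int × Int))) (v : Int × Int) : Nat :=
  ps.countP (fun ab => decide (ab.1 = v) && pvFar ab.1 ab.2)

theorem pvKeep_nonpos (locs : List (Int × Int)) (cnt : (Int × Int) → Int)
    (h : ∀ v, cnt v ≤ 0) : pvKeep locs cnt = locs := by
  induction locs generalizing cnt with
  | nil => rfl
  | cons a xs ih =>
      simp only [pvKeep, if_pos (h a)]
      refine congrArg (a :: ·) (ih _ fun v => ?_)
      split <;> [exact le_trans (by omega) (h v); exact h v]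

theorem pvKeep_erase (locs : List (Int × Int)) (cnt : (Int × Int) → Int) (r : Int × Int)
    (hr : 0 ≤ cnt r) :
    pvKeep (locs.erase r) cnt = pvKeep locs (fun v => if v = r then cnt v + 1 else cnt v) := by
  induction locs generalizing cnt with
  | nil => rfl
  | cons a xs ih =>
      by_cases har : a = r
      · subst har
        rw [List.erase_cons_head]
        have hfun : (fun v => if v = a then (if v = a then cnt v + 1 else cnt v) - 1
                              else (if v = a then cnt v + 1 else cnt v)) = cnt := by
          funext v
          by_cases hv : v = a <;> simp [hv]
        simp only [pvKeep, hfun, ite_true]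
        rw [if_neg (by omega : ¬ cnt a + 1 ≤ 0)]
      · rw [List.erase_cons_tail (by simp [har])]
        have h0 : (0 : Int) ≤ (if r = a then cnt r - 1 else cnt r) := by
          rw [if_neg (fun h => har (Eq.symm h))]; exact hr
        have hfun : (fun v => if v = r then (if v = a then cnt v - 1 else cnt v) + 1
                              else (if v = a then cnt v - 1 else cnt v))
            = (fun v => if v = a then (if v = r then cnt v + 1 else cnt v) - 1
                        else (if v = r then cnt v + 1 else cnt v)) := by
          funext v
          by_cases hv : v = r <;> by_cases hv' : v = a <;> simp_all
        simp only [pvKeep, ih (fun v => if v = a then cnt v - 1 else cnt v) h0, hfun,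
          if_neg har]

theorem pvErase_fold (rems : List (Int × Int)) (locs : List (Int × Int)) :
    rems.foldl (fun st r => st.erase r) locs = pvKeep locs (fun v => (rems.count v : Int)) := by
  induction rems generalizing locs with
  | nil =>
      simp only [List.foldl_nil]
      exact (pvKeep_nonpos locs _ (fun v => by simp)).symm
  | cons r rs ih =>
      simp only [List.foldl_cons]
      rw [ih, pvKeep_erase _ _ r (by positivity)]
      congr 1
      funext v
      by_cases hv : v = r
      · simp [hv]
      · simp [hv, show ¬ r = v from fun h => hv (Eq.symm h)]

-- A's step is: erase the head of the pair iff the pair is far (equal pairs are never far)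
theorem pvStepA_eq (st : List (Int × Int)) (ab : (Int × Int) × (Int × Int)) :
    (if ab.1 = ab.2 then st
     else if (100 : Int) < |ab.1.1 - ab.2.1| then
       (if ab.1 ∈ st then st.erase ab.1 else st)
     else st) = if pvFar ab.1 ab.2 then st.erase ab.1 else st := by
  by_cases heq : ab.1 = ab.2
  · have : ¬ pvFar ab.1 ab.2 := by simp [pvFar, heq]
    rw [if_pos heq, if_neg this]
  · by_cases hf : (100 : Int) < |ab.1.1 - ab.2.1|
    · have : pvFar ab.1 ab.2 := by simp [pvFar, hf]
      simp only [if_neg heq, if_pos hf, if_pos this]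
      by_cases hm : ab.1 ∈ st
      · simp [hm]
      · simp [hm, List.erase_of_not_mem hm]
    · have : ¬ pvFar ab.1 ab.2 := by simp [pvFar, hf]
      simp [heq, hf, this]

theorem pvA_fold (ps : List ((Int × Int) × (Int × Int))) (st : List (Int × Int)) :
    ps.foldl (fun st ab =>
        if ab.1 = ab.2 then st
        else if (100 : Int) < |ab.1.1 - ab.2.1| then
          (if ab.1 ∈ st then st.erase ab.1 else st)
        else st) st
      = (ps.filterMap (fun ab => if pvFar ab.1 ab.2 then some ab.1 else none)).foldl
          (fun st r => st.erase r) st := by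
  induction ps generalizing st with
  | nil => rfl
  | cons ab ps ih =>
      simp only [List.foldl_cons, List.filterMap_cons]
      rw [pvStepA_eq]
      by_cases hf : pvFar ab.1 ab.2 <;> simp [hf, ih]

theorem pvCount_filterMap (ps : List ((Int × Int) × (Int × Int))) (v : Int × Int) :
    (ps.filterMap (fun ab => if pvFar ab.1 ab.2 then some ab.1 else none)).count v
      = pvSpecCnt ps v := by
  induction ps with
  | nil => rfl
  | cons ab ps ih =>
      simp only [List.filterMap_cons, pvSpecCnt, List.countP_cons]
      by_cases hf : pvFar ab.1 ab.2
      · by_cases hv : ab.1 = v <;>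
          simp_all [pvSpecCnt]
      · simp_all [pvSpecCnt]

-- A computes pvKeep with the pair counts
theorem pvA_char (locs : List (Int × Int)) :
    remove_far_locs locs = pvKeep locs (fun v => ((pvSpecCnt (pvCombs locs) v : Nat) : Int)) := by
  unfold remove_far_locs
  rw [pvA_fold, pvErase_fold]
  congr 1
  funext v
  rw [pvCount_filterMap]

-- pair counts headed by v = pvHeadFar
theorem pvHeadFar_eq (locs : List (Int × Int)) (v : Int × Int) :
    pvSpecCnt (pvCombs locs) v = pvHeadFar locs v := by
  induction locs with
  | nil => rfl
  | cons a xs ih =>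
      simp only [pvSpecCnt, pvCombs, List.countP_append, pvHeadFar, List.countP_map]
      rw [← ih]
      simp only [pvSpecCnt]
      congr 1
      by_cases hv : a = v
      · subst hv
        rw [if_pos rfl]
        refine List.countP_congr (fun b _ => ?_)
        simp [pvFar]
      · rw [if_neg hv]
        have : ((fun ab => decide (ab.1 = v) && pvFar ab.1 ab.2) ∘ fun y => (a, y))
            = fun _ => false := by funext b; simp [hv]
        rw [this]
        simp

-- ---- B characterization ----

-- keep a point iff it is within 100 (in x) of every later point
def pvKeepSpec : List (Int × Int) → List (Int × Int)
  | [] => []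
  | a :: xs =>
      if xs.all (fun b => decide (|a.1 - b.1| ≤ 100)) then a :: pvKeepSpec xs else pvKeepSpec xs

theorem pvKeepSpec_cons (a : Int × Int) (xs : List (Int × Int)) :
    pvKeepSpec (a :: xs)
      = if xs.all (fun b => decide (|a.1 - b.1| ≤ 100)) then a :: pvKeepSpec xs
        else pvKeepSpec xs := rfl

theorem pvKeep_cons (a : Int × Int) (xs : List (Int × Int)) (cnt : (Int × Int) → Int) :
    pvKeep (a :: xs) cnt
      = if cnt a ≤ 0 then a :: pvKeep xs (fun v => if v = a then cnt v - 1 else cnt v)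
        else pvKeep xs (fun v => if v = a then cnt v - 1 else cnt v) := rfl

def pvMinx : List (Int × Int) → Option Int
  | [] => none
  | p :: l => some (match pvMinx l with | none => p.1 | some m => min m p.1)

def pvMaxx : List (Int × Int) → Option Int
  | [] => none
  | p :: l => some (match pvMaxx l with | none => p.1 | some M => max M p.1)

theorem pvMinx_spec (xs : List (Int × Int)) :
    (xs = [] ∧ pvMinx xs = none) ∨
      ∃ m, pvMinx xs = some m ∧ (∃ b ∈ xs, b.1 = m) ∧ ∀ b ∈ xs, m ≤ b.1 := by
  induction xs with
  | nil => exact Or.inl ⟨rfl, rfl⟩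
  | cons p l ih =>
      right
      rcases ih with ⟨hl, hn⟩ | ⟨m, hm, ⟨b, hb, hbm⟩, hall⟩
      · subst hl
        exact ⟨p.1, rfl, ⟨p, by simp, rfl⟩, by simp⟩
      · refine ⟨min m p.1, by simp [pvMinx, hm], ?_, ?_⟩
        · by_cases h : m ≤ p.1
          · exact ⟨b, by simp [hb], by rw [hbm]; omega⟩
          · exact ⟨p, by simp, by omega⟩
        · intro c hc
          rcases List.mem_cons.mp hc with h | h
          · subst h; omega
          · have := hall c h; omega

theorem pvMaxx_spec (xs : List (Int × Int)) :
    (xs = [] ∧ pvMaxx xs = none) ∨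
      ∃ M, pvMaxx xs = some M ∧ (∃ b ∈ xs, b.1 = M) ∧ ∀ b ∈ xs, b.1 ≤ M := by
  induction xs with
  | nil => exact Or.inl ⟨rfl, rfl⟩
  | cons p l ih =>
      right
      rcases ih with ⟨hl, hn⟩ | ⟨M, hM, ⟨b, hb, hbM⟩, hall⟩
      · subst hl
        exact ⟨p.1, rfl, ⟨p, by simp, rfl⟩, by simp⟩
      · refine ⟨max M p.1, by simp [pvMaxx, hM], ?_, ?_⟩
        · by_cases h : p.1 ≤ M
          · exact ⟨b, by simp [hb], by rw [hbM]; omega⟩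
          · exact ⟨p, by simp, by omega⟩
        · intro c hc
          rcases List.mem_cons.mp hc with h | h
          · subst h; omega
          · have := hall c h; omega

theorem pvB_fold (xs : List (Int × Int)) :
    xs.reverse.foldl pvBStep ([], none, none)
      = ((pvKeepSpec xs).reverse, pvMinx xs, pvMaxx xs) := by
  induction xs with
  | nil => rfl
  | cons a l ih =>
      have : (a :: l).reverse = l.reverse ++ [a] := by simp
      rw [this, List.foldl_append, ih]
      simp only [List.foldl_cons, List.foldl_nil]
      have hcond :
          (match pvMinx l, pvMaxx l with
            | some m, some M =>
                if a.1 - m ≤ 100 ∧ M - a.1 ≤ 100 then (pvKeepSpec l).reverse ++ [a]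
                else (pvKeepSpec l).reverse
            | _, _ => (pvKeepSpec l).reverse ++ [a])
          = (pvKeepSpec (a :: l)).reverse := by
        rcases pvMinx_spec l with ⟨hl, hn⟩ | ⟨m, hm, ⟨bm, hbm, hbme⟩, hmall⟩
        · subst hl
          simp [pvKeepSpec, pvMinx, pvMaxx]
        · rcases pvMaxx_spec l with ⟨hl', _⟩ | ⟨M, hM, ⟨bM, hbM, hbMe⟩, hMall⟩
          · subst hl'; simp at hbm
          · rw [hm, hM]
            show (if a.1 - m ≤ 100 ∧ M - a.1 ≤ 100 then (pvKeepSpec l).reverse ++ [a]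
                  else (pvKeepSpec l).reverse) = (pvKeepSpec (a :: l)).reverse
            have hiff : (a.1 - m ≤ 100 ∧ M - a.1 ≤ 100)
                ↔ (l.all (fun b => decide (|a.1 - b.1| ≤ 100)) = true) := by
              simp only [List.all_eq_true, decide_eq_true_eq]
              constructor
              · rintro ⟨h1, h2⟩ b hb
                have := hmall b hb; have := hMall b hb
                rw [abs_le]; omega
              · intro h
                have h1 := h bm hbm
                have h2 := h bM hbM
                rw [abs_le] at h1 h2
                omega
            by_cases hc : a.1 - m ≤ 100 ∧ M - a.1 ≤ 100
            · rw [if_pos hc, pvKeepSpec_cons, if_pos (hiff.mp hc)]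
              simp
            · rw [if_neg hc, pvKeepSpec_cons, if_neg (fun h => hc (hiff.mpr h))]
      unfold pvBStep
      simp only at hcond ⊢
      rw [hcond]
      rfl

theorem pvB_char (locs : List (Int × Int)) :
    remove_far_locs_alt locs = pvKeepSpec locs := by
  unfold remove_far_locs_alt
  rw [pvB_fold]
  simp

-- ---- pvKeepSpec as a pvKeep with per-value drop counts ----

-- a congruence for pvKeep: counters that are equal or both non-positive give the same result
theorem pvKeep_congr (xs : List (Int × Int)) (c1 c2 : (Int × Int) → Int)
    (h : ∀ v, c1 v = c2 v ∨ (c1 v ≤ 0 ∧ c2 v ≤ 0)) : pvKeep xs c1 = pvKeep xs c2 := by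
  induction xs generalizing c1 c2 with
  | nil => rfl
  | cons a l ih =>
      have hstep : ∀ v, (if v = a then c1 v - 1 else c1 v) = (if v = a then c2 v - 1 else c2 v)
          ∨ ((if v = a then c1 v - 1 else c1 v) ≤ 0 ∧ (if v = a then c2 v - 1 else c2 v) ≤ 0) := by
        intro v
        rcases h v with h' | h'
        · exact Or.inl (by rw [h'])
        · right; constructor <;> split <;> omega
      have hkeep : (c1 a ≤ 0) = (c2 a ≤ 0) := by
        rcases h a with h' | h'
        · rw [h']
        · simp only [eq_iff_iff]; omega
      simp only [pvKeep, hkeep, ih _ _ hstep]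

-- stronger congruence: counters equal, both non-positive, or both at least the multiplicity
theorem pvKeep_rel (xs : List (Int × Int)) (c1 c2 : (Int × Int) → Int)
    (h : ∀ v, c1 v = c2 v ∨ (c1 v ≤ 0 ∧ c2 v ≤ 0)
          ∨ ((xs.count v : Int) ≤ c1 v ∧ (xs.count v : Int) ≤ c2 v)) :
    pvKeep xs c1 = pvKeep xs c2 := by
  induction xs generalizing c1 c2 with
  | nil => rfl
  | cons a l ih =>
      have hstep : ∀ v, (if v = a then c1 v - 1 else c1 v) = (if v = a then c2 v - 1 else c2 v)
          ∨ ((if v = a then c1 v - 1 else c1 v) ≤ 0 ∧ (if v = a then c2 v - 1 else c2 v) ≤ 0)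
          ∨ ((l.count v : Int) ≤ (if v = a then c1 v - 1 else c1 v)
              ∧ (l.count v : Int) ≤ (if v = a then c2 v - 1 else c2 v)) := by
        intro v
        have hcnt : ((a :: l).count v : Int)
            = (l.count v : Int) + (if v = a then 1 else 0) := by
          by_cases hv : v = a
          · subst hv; rw [List.count_cons_self]; push_cast; simp
          · have hne : ¬ a = v := fun h => hv h.symm
            simp [hv, hne]
        rcases h v with h' | h' | h'
        · exact Or.inl (by rw [h'])
        · obtain ⟨ha1, ha2⟩ := h'
          refine Or.inr (Or.inl ⟨?_, ?_⟩) <;> split <;> omega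
        · rw [hcnt] at h'
          obtain ⟨ha1, ha2⟩ := h'
          by_cases hv : v = a
          · simp only [if_pos hv] at ha1 ha2 ⊢
            exact Or.inr (Or.inr ⟨by omega, by omega⟩)
          · simp only [if_neg hv] at ha1 ha2 ⊢
            exact Or.inr (Or.inr ⟨by omega, by omega⟩)
      have hkeep : (c1 a ≤ 0) = (c2 a ≤ 0) := by
        have hpos : (1 : Int) ≤ ((a :: l).count a : Int) := by
          rw [List.count_cons_self]; push_cast; omega
        rcases h a with h' | h' | h'
        · rw [h']
        · simp only [eq_iff_iff]; omega
        · simp only [eq_iff_iff]; omega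
      simp only [pvKeep, hkeep, ih _ _ hstep]

theorem pvBadOcc_zero (xs : List (Int × Int)) (v : Int × Int)
    (h : ∀ b ∈ xs, |v.1 - b.1| ≤ 100) : pvBadOcc xs v = 0 := by
  induction xs with
  | nil => rfl
  | cons a l ih =>
      have hl : ∀ b ∈ l, |v.1 - b.1| ≤ 100 := fun b hb => h b (by simp [hb])
      have hany : l.any (fun b => decide ((100 : Int) < |v.1 - b.1|)) = false := by
        simp only [List.any_eq_false, decide_eq_true_eq]
        intro b hb
        have := hl b hb; omega
      simp [pvBadOcc, hany, ih hl]

theorem pvKeepSpec_eq (xs : List (Int × Int)) :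
    pvKeepSpec xs = pvKeep xs (fun v => ((pvBadOcc xs v : Nat) : Int)) := by
  induction xs with
  | nil => rfl
  | cons a l ih =>
      by_cases hall : l.all (fun b => decide (|a.1 - b.1| ≤ 100)) = true
      · -- a is kept: a has no later far point, and neither has any other occurrence of a
        have hclose : ∀ b ∈ l, |a.1 - b.1| ≤ 100 := by
          intro b hb
          have := (List.all_eq_true.mp hall) b hb
          simpa using this
        have hany : l.any (fun b => decide ((100 : Int) < |a.1 - b.1|)) = false := by
          simp only [List.any_eq_false, decide_eq_true_eq]
          intro b hb; have := hclose b hb; omega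
        have hz : pvBadOcc l a = 0 := pvBadOcc_zero l a hclose
        have hhead : pvBadOcc (a :: l) a = 0 := by
          simp [pvBadOcc, hany, hz]
        rw [pvKeepSpec_cons, if_pos hall, pvKeep_cons]
        rw [if_pos (by rw [hhead]; simp)]
        refine congrArg (a :: ·) ?_
        rw [ih]
        apply pvKeep_congr
        intro v
        by_cases hv : v = a
        · subst hv
          right
          constructor
          · simp [hz]
          · simp [hhead]
        · left
          have h1 : pvBadOcc (a :: l) v = pvBadOcc l v := by
            simp only [pvBadOcc]
            rw [if_neg (by rintro ⟨h', _⟩; exact hv h'.symm)]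
            omega
          simp [if_neg hv, h1]
      · -- a is dropped: pvBadOcc (a :: l) a ≥ 1
        have hfar : ∃ b ∈ l, (100 : Int) < |a.1 - b.1| := by
          by_contra h
          apply hall
          simp only [List.all_eq_true, decide_eq_true_eq]
          intro b hb
          by_contra hb2
          exact h ⟨b, hb, by omega⟩
        rcases hfar with ⟨b, hb, hbf⟩
        have hany : l.any (fun b => decide ((100 : Int) < |a.1 - b.1|)) = true :=
          List.any_eq_true.mpr ⟨b, hb, decide_eq_true hbf⟩
        have hhead : pvBadOcc (a :: l) a = 1 + pvBadOcc l a := by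
          simp [pvBadOcc, hany]
        rw [pvKeepSpec_cons, if_neg (by simp [hall]), pvKeep_cons]
        rw [if_neg (by rw [hhead]; push_cast; omega)]
        rw [ih]
        apply pvKeep_congr
        intro v
        by_cases hv : v = a
        · subst hv
          left
          simp only [hhead]
          push_cast
          ring
        · left
          have h1 : pvBadOcc (a :: l) v = pvBadOcc l v := by
            simp only [pvBadOcc]
            rw [if_neg (by rintro ⟨h', _⟩; exact hv h'.symm)]
            omega
          simp [if_neg hv, h1]

-- ---- bounds on pvBadOcc ----

theorem pvBadOcc_le_count (xs : List (Int × Int)) (v : Int × Int) :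
    pvBadOcc xs v ≤ xs.count v := by
  induction xs with
  | nil => exact Nat.le_refl 0
  | cons a l ih =>
      rw [List.count_cons]
      simp only [pvBadOcc]
      by_cases hv : a = v
      · subst hv
        split <;> simp <;> omega
      · rw [if_neg (by simp [hv])]
        simp [hv]
        omega

theorem pvBadOcc_le_headFar (xs : List (Int × Int)) (v : Int × Int) :
    pvBadOcc xs v ≤ pvHeadFar xs v := by
  induction xs with
  | nil => exact Nat.le_refl 0
  | cons a l ih =>
      simp only [pvBadOcc, pvHeadFar]
      by_cases hv : a = v
      · by_cases hany : l.any (fun b => decide ((100 : Int) < |v.1 - b.1|)) = true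
        · rw [if_pos ⟨hv, hany⟩, if_pos hv]
          have : 1 ≤ l.countP (fun b => decide ((100 : Int) < |v.1 - b.1|)) := by
            rcases List.any_eq_true.mp hany with ⟨b, hb, hf⟩
            calc 1 = [b].countP (fun b => decide ((100 : Int) < |v.1 - b.1|)) := by simp [hf]
              _ ≤ _ := List.Sublist.countP_le (List.singleton_sublist.mpr hb)
          omega
        · rw [if_neg (by rintro ⟨_, h⟩; exact hany h)]
          omega
      · rw [if_neg (by rintro ⟨h, _⟩; exact hv h), if_neg hv]
        simpa using ih

-- ---- result multiplicities of pvKeep ----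

theorem pvKeep_count (xs : List (Int × Int)) (c : (Int × Int) → Int) (v : Int × Int) :
    ((pvKeep xs c).count v : Int) = max ((xs.count v : Int) - max (c v) 0) 0 := by
  induction xs generalizing c with
  | nil => simp [pvKeep]
  | cons a l ih =>
      rw [pvKeep_cons]
      have hcnt : ∀ (r : List (Int × Int)),
          ((a :: r).count v : Int) = (r.count v : Int) + (if v = a then 1 else 0) := by
        intro r
        by_cases hv : v = a
        · subst hv; rw [List.count_cons_self]; push_cast; simp
        · have hne : ¬ a = v := fun h => hv h.symm
          simp [hv, hne]
      have hc := ih (fun w => if w = a then c w - 1 else c w)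
      simp only at hc
      by_cases hv : v = a
      · rw [if_pos hv] at hc
        by_cases hk : c a ≤ 0
        · rw [if_pos hk, hcnt, hcnt, hc, if_pos hv]
          rw [← hv] at hk
          omega
        · rw [if_neg hk, hcnt, hc, if_pos hv]
          rw [← hv] at hk
          omega
      · rw [if_neg hv] at hc
        by_cases hk : c a ≤ 0
        · rw [if_pos hk, hcnt, hcnt, hc, if_neg hv]
          omega
        · rw [if_neg hk, hcnt, hc, if_neg hv]
          omega

theorem pvBadOcc_not_mem (xs : List (Int × Int)) (v : Int × Int) (h : v ∉ xs) :
    pvBadOcc xs v = 0 := by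
  induction xs with
  | nil => rfl
  | cons a l ih =>
      simp only [pvBadOcc]
      rw [if_neg (by rintro ⟨h', _⟩; exact h (by rw [← h']; exact List.mem_cons_self))]
      have := ih (fun h' => h (List.mem_cons_of_mem a h'))
      omega

theorem pvHeadFar_not_mem (xs : List (Int × Int)) (v : Int × Int) (h : v ∉ xs) :
    pvHeadFar xs v = 0 := by
  induction xs with
  | nil => rfl
  | cons a l ih =>
      simp only [pvHeadFar]
      rw [if_neg (fun h' => h (by rw [← h']; exact List.mem_cons_self))]
      have := ih (fun h' => h (List.mem_cons_of_mem a h'))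
      omega

-- ===== VERDICT (by name: the statements are the Claim_ definitions above) =====

theorem remove_far_locs_spec : Claim_unchanged_remove_far_locs := by
  intro locs _
  unfold Spec_remove_far_locs
  intro hD
  rw [pvA_char, pvB_char, pvKeepSpec_eq]
  apply pvKeep_rel
  intro v
  rw [pvHeadFar_eq]
  by_cases hmem : v ∈ locs
  · have h1 := pvBadOcc_le_count locs v
    have h2 := pvBadOcc_le_headFar locs v
    have : ¬ (pvBadOcc locs v < locs.count v ∧ pvBadOcc locs v < pvHeadFar locs v) := by
      intro h
      exact hD ⟨v, hmem, h⟩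
    rcases Nat.lt_or_ge (pvBadOcc locs v) (locs.count v) with hlt | hge
    · -- then pvBadOcc = pvHeadFar
      have hle : pvHeadFar locs v ≤ pvBadOcc locs v := by
        by_contra h
        exact this ⟨hlt, by omega⟩
      left
      have heq : pvHeadFar locs v = pvBadOcc locs v := le_antisymm hle h2
      rw [heq]
    · -- badOcc = count: both counters are at least the multiplicity
      right; right
      constructor
      · exact_mod_cast (by omega : locs.count v ≤ pvHeadFar locs v)
      · exact_mod_cast hge
  · -- v not in locs: both counters are zero
    left
    rw [pvBadOcc_not_mem locs v hmem, pvHeadFar_not_mem locs v hmem]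

theorem remove_far_locs_changed : Claim_changed_remove_far_locs := by
  unfold Claim_changed_remove_far_locs; decide

theorem remove_far_locs_tight : Claim_exact_remove_far_locs := by
  intro locs _ hD heq
  rcases hD with ⟨v, hmem, hkm, hkc⟩
  have hA := pvA_char locs
  have hB := (pvB_char locs).trans (pvKeepSpec_eq locs)
  have hcount : (remove_far_locs locs).count v = (remove_far_locs_alt locs).count v := by
    rw [heq]
  rw [hA, hB] at hcount
  have h1 := pvKeep_count locs (fun w => ((pvSpecCnt (pvCombs locs) w : Nat) : Int)) v
  have h2 := pvKeep_count locs (fun w => ((pvBadOcc locs w : Nat) : Int)) v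
  have hthis : ((pvKeep locs (fun w => ((pvSpecCnt (pvCombs locs) w : Nat) : Int))).count v : Int)
      = ((pvKeep locs (fun w => ((pvBadOcc locs w : Nat) : Int))).count v : Int) := by
    exact_mod_cast hcount
  rw [h1, h2] at hthis
  have hk0 : (0 : Int) ≤ (pvBadOcc locs v : Int) := by positivity
  have hmc : (pvBadOcc locs v : Int) < (locs.count v : Int) := by exact_mod_cast hkm
  have hcc : (pvBadOcc locs v : Int) < (pvSpecCnt (pvCombs locs) v : Int) := by
    rw [pvHeadFar_eq]
    exact_mod_cast hkc
  omega
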